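-- pv_equiv track=rewrite | github.com/Ryannewman610/hrp-ops | scripts/10_parse_forum_notes.py | parse_optional_headers
-- ===== SOURCE A (Python) =====
-- from typing import Dict, List, Tuple
--
-- def parse_optional_headers(text: str) -> Tuple[str, str, str]:
--     source_url = ""
--     author = ""
--     date = ""
--     for raw_line in text.splitlines()[:20]:
--         line = raw_line.strip()
--         if not line:
--             continue
--         if line.lower().startswith("url:") and not source_url:
--             source_url = line.split(":", 1)[1].strip()
--         elif line.lower().startswith(("author:", "posted by:", "user:")) and not author:
--             author = line.split(":", 1)[1].strip()
--         elif line.lower().startswith(("date:", "posted:")) and not date: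
--             date = line.split(":", 1)[1].strip()
--     return source_url, author, date
-- ===== SOURCE B (Python) =====
-- URL_PREFIXES = ("url:",)
-- AUTHOR_PREFIXES = ("author:", "posted by:", "user:")
-- DATE_PREFIXES = ("date:", "posted:")
--
--
-- def _first_value(lines, prefixes):
--     for line in lines:
--         if line.lower().startswith(prefixes):
--             value = line.split(":", 1)[1].strip()
--             if value:
--                 return value
--     return ""
--
--
-- def parse_optional_headers(text):
--     lines = [raw.strip() for raw in text.splitlines()[:20]]
--     return (_first_value(lines, URL_PREFIXES),
--             _first_value(lines, AUTHOR_PREFIXES),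
--             _first_value(lines, DATE_PREFIXES))
-- ===== Notes on version B (the rewrite author's own statement) =====
-- stated objective: idiomatic
-- what changed: Replaces the single elif-chained pass mutating three state variables with one strip pass plus three independent per-field scans, each returning the first matching line's non-empty extracted value (valid because the prefix sets are mutually exclusive at line start).
import Mathlib
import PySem

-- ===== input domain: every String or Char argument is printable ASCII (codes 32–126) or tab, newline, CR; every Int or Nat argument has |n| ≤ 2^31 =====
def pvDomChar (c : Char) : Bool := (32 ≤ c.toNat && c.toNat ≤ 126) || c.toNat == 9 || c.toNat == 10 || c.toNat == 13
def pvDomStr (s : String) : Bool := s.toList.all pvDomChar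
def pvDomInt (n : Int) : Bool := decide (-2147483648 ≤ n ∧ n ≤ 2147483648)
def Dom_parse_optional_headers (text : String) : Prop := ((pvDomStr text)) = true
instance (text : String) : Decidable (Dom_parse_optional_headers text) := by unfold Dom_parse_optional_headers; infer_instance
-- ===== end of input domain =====

-- B replaces A's single elif-chained pass over three mutable fields by one strip pass plus three
-- independent per-field scans (first matching line with a non-empty extracted value); objective: idiomatic.


-- ===== PORT A =====
-- line.split(":", 1)[1].strip(); index 1 exists wherever A reaches it (the branch guard guarantees a ':'),
-- so the default "" of pyGetD is unreachable there.
def extractColon (line : String) : String :=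
  PySem.Str.strip (PySem.List.pyGetD ((PySem.Str.splitMax? line ":" 1).getD []) 1 "")

-- the body of A's for-loop, one step of the fold
def aStep (s : String × String × String) (raw_line : String) : String × String × String :=
  let line := PySem.Str.strip raw_line
  if line == "" then s
  else if PySem.Str.startswith (PySem.Str.lower line) "url:" && s.1 == "" then
    (extractColon line, s.2.1, s.2.2)
  else if (PySem.Str.startswith (PySem.Str.lower line) "author:" ||
           PySem.Str.startswith (PySem.Str.lower line) "posted by:" ||
           PySem.Str.startswith (PySem.Str.lower line) "user:") && s.2.1 == "" then
    (s.1, extractColon line, s.2.2)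
  else if (PySem.Str.startswith (PySem.Str.lower line) "date:" ||
           PySem.Str.startswith (PySem.Str.lower line) "posted:") && s.2.2 == "" then
    (s.1, s.2.1, extractColon line)
  else s

def parse_optional_headers (text : String) : String × String × String :=
  (PySem.List.slice (PySem.Str.splitlines text) none (some 20)).foldl aStep ("", "", "")

-- ===== PORT B =====
def URL_PREFIXES : List String := ["url:"]
def AUTHOR_PREFIXES : List String := ["author:", "posted by:", "user:"]
def DATE_PREFIXES : List String := ["date:", "posted:"]

-- _first_value: first line matching a prefix whose extracted value is non-empty
def firstValue (lines : List String) (prefixes : List String) : String :=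
  match lines with
  | [] => ""
  | line :: rest =>
    if prefixes.any (fun p => PySem.Str.startswith (PySem.Str.lower line) p) then
      let value := extractColon line
      if value == "" then firstValue rest prefixes else value
    else firstValue rest prefixes

def parse_optional_headers_alt (text : String) : String × String × String :=
  let lines := (PySem.List.slice (PySem.Str.splitlines text) none (some 20)).map PySem.Str.strip
  (firstValue lines URL_PREFIXES, firstValue lines AUTHOR_PREFIXES, firstValue lines DATE_PREFIXES)

-- ===== PRECONDITION & SPEC =====
def Spec_parse_optional_headers (text : String) (out : String × String × String) : Prop := out = parse_optional_headers_alt text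
instance (text : String) (out : String × String × String) : Decidable (Spec_parse_optional_headers text out) := by unfold Spec_parse_optional_headers; infer_instance

-- ===== CLAIM (what is proved, stated in full; the proofs are below) =====
def Claim_equal_parse_optional_headers : Prop := ∀ (text : String), Dom_parse_optional_headers text → Spec_parse_optional_headers text (parse_optional_headers text)

-- ===== LEMMAS AND PROOFS =====

-- one step of B's independent per-field scan, as a fold over the raw lines
def gStep (ps : List String) (acc : String) (raw : String) : String :=
  let line := PySem.Str.strip raw
  if (ps.any fun p => PySem.Str.startswith (PySem.Str.lower line) p) && acc == "" then
    (if extractColon line == "" then acc else extractColon line)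
  else acc

-- two strings of which neither is a prefix of the other cannot both be prefixes of s
theorem sw_excl (s p q : String) (h1 : ¬ (p.toList <+: q.toList)) (h2 : ¬ (q.toList <+: p.toList))
    (hp : PySem.Str.startswith s p = true) : PySem.Str.startswith s q = false := by
  cases hv : PySem.Str.startswith s q with
  | false => rfl
  | true =>
    rw [PySem.Str.startswith_eq, PySem.Chars.startswith_iff] at hp hv
    rcases List.prefix_or_prefix_of_prefix hp hv with hc | hc
    · exact absurd hc h1
    · exact absurd hc h2

-- at line start, the url / author / date prefix families are mutually exclusive
theorem disjUA (m : String) (h : PySem.Str.startswith m "url:" = true) :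
    (PySem.Str.startswith m "author:" || PySem.Str.startswith m "posted by:" ||
     PySem.Str.startswith m "user:") = false := by
  rw [sw_excl m "url:" "author:" (by decide) (by decide) h,
      sw_excl m "url:" "posted by:" (by decide) (by decide) h,
      sw_excl m "url:" "user:" (by decide) (by decide) h]
  rfl

theorem disjUD (m : String) (h : PySem.Str.startswith m "url:" = true) :
    (PySem.Str.startswith m "date:" || PySem.Str.startswith m "posted:") = false := by
  rw [sw_excl m "url:" "date:" (by decide) (by decide) h,
      sw_excl m "url:" "posted:" (by decide) (by decide) h]
  rfl

theorem disjAD (m : String)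
    (h : (PySem.Str.startswith m "author:" || PySem.Str.startswith m "posted by:" ||
          PySem.Str.startswith m "user:") = true) :
    (PySem.Str.startswith m "date:" || PySem.Str.startswith m "posted:") = false := by
  simp only [Bool.or_eq_true] at h
  rcases h with (h | h) | h
  · rw [sw_excl m "author:" "date:" (by decide) (by decide) h,
        sw_excl m "author:" "posted:" (by decide) (by decide) h]; rfl
  · rw [sw_excl m "posted by:" "date:" (by decide) (by decide) h,
        sw_excl m "posted by:" "posted:" (by decide) (by decide) h]; rfl
  · rw [sw_excl m "user:" "date:" (by decide) (by decide) h,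
        sw_excl m "user:" "posted:" (by decide) (by decide) h]; rfl

-- one loop step of A equals the three independent per-field steps
theorem step_factor (u a d raw : String) :
    aStep (u, a, d) raw =
      (gStep URL_PREFIXES u raw, gStep AUTHOR_PREFIXES a raw, gStep DATE_PREFIXES d raw) := by
  unfold aStep gStep URL_PREFIXES AUTHOR_PREFIXES DATE_PREFIXES
  simp only [List.any_cons, List.any_nil, Bool.or_false, ← Bool.or_assoc]
  generalize PySem.Str.strip raw = line
  by_cases h0 : line = ""
  · subst h0
    rw [if_pos (by decide : ((("" : String) == "")) = true),
        (by decide : PySem.Str.startswith (PySem.Str.lower "") "url:" = false),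
        (by decide : PySem.Str.startswith (PySem.Str.lower "") "author:" = false),
        (by decide : PySem.Str.startswith (PySem.Str.lower "") "posted by:" = false),
        (by decide : PySem.Str.startswith (PySem.Str.lower "") "user:" = false),
        (by decide : PySem.Str.startswith (PySem.Str.lower "") "date:" = false),
        (by decide : PySem.Str.startswith (PySem.Str.lower "") "posted:" = false)]
    simp only [Bool.or_self, Bool.false_and, Bool.false_eq_true, if_false]
  · rw [if_neg (by simp [h0] : ¬ ((line == "")) = true)]
    generalize PySem.Str.lower line = m
    by_cases h1 : (PySem.Str.startswith m "url:" && u == "") = true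
    · rw [if_pos h1, if_pos h1]
      obtain ⟨hcU, hu0⟩ := by simpa only [Bool.and_eq_true] using h1
      have hu : u = "" := by simpa using hu0
      rw [disjUA m hcU, disjUD m hcU]
      simp only [Bool.false_and, Bool.false_eq_true, if_false]
      by_cases hv : (extractColon line == "") = true
      · have hv' : extractColon line = "" := by simpa using hv
        rw [if_pos hv, hv', hu]
      · rw [if_neg hv]
    · rw [if_neg h1, if_neg h1]
      by_cases h2 : ((PySem.Str.startswith m "author:" || PySem.Str.startswith m "posted by:" ||
          PySem.Str.startswith m "user:") && a == "") = true
      · rw [if_pos h2, if_pos h2]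
        obtain ⟨hcA, ha0⟩ := by simpa only [Bool.and_eq_true] using h2
        have ha : a = "" := by simpa using ha0
        rw [disjAD m hcA]
        simp only [Bool.false_and, Bool.false_eq_true, if_false]
        by_cases hv : (extractColon line == "") = true
        · have hv' : extractColon line = "" := by simpa using hv
          rw [if_pos hv, hv', ha]
        · rw [if_neg hv]
      · rw [if_neg h2, if_neg h2]
        by_cases h3 : ((PySem.Str.startswith m "date:" || PySem.Str.startswith m "posted:") &&
            d == "") = true
        · rw [if_pos h3, if_pos h3]
          obtain ⟨hcD, hd0⟩ := by simpa only [Bool.and_eq_true] using h3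
          have hd : d = "" := by simpa using hd0
          by_cases hv : (extractColon line == "") = true
          · have hv' : extractColon line = "" := by simpa using hv
            rw [if_pos hv, hv', hd]
          · rw [if_neg hv]
        · rw [if_neg h3, if_neg h3]

-- A's single fold factors into the three independent folds
theorem factor (ls : List String) (u a d : String) :
    ls.foldl aStep (u, a, d) =
      (ls.foldl (gStep URL_PREFIXES) u, ls.foldl (gStep AUTHOR_PREFIXES) a,
       ls.foldl (gStep DATE_PREFIXES) d) := by
  induction ls generalizing u a d with
  | nil => rfl
  | cons raw rest ih =>
    simp only [List.foldl_cons]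
    rw [step_factor]
    exact ih _ _ _

-- each per-field fold computes B's first-non-empty-value scan
theorem g_first (ps : List String) (ls : List String) (u : String) :
    ls.foldl (gStep ps) u =
      if u == "" then firstValue (ls.map PySem.Str.strip) ps else u := by
  induction ls generalizing u with
  | nil =>
    by_cases hu : u = ""
    · subst hu; rw [if_pos (by decide : ((("" : String) == "")) = true)]; rfl
    · rw [if_neg (by simp [hu] : ¬ ((u == "")) = true)]; rfl
  | cons raw rest ih =>
    have hfv : firstValue (PySem.Str.strip raw :: List.map PySem.Str.strip rest) ps =
        if (ps.any fun p => PySem.Str.startswith (PySem.Str.lower (PySem.Str.strip raw)) p) then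
          (if extractColon (PySem.Str.strip raw) == "" then firstValue (List.map PySem.Str.strip rest) ps
           else extractColon (PySem.Str.strip raw))
        else firstValue (List.map PySem.Str.strip rest) ps := rfl
    simp only [List.foldl_cons, List.map_cons]
    rw [ih]
    by_cases hu : u = ""
    · subst hu
      rw [if_pos (by decide : ((("" : String) == "")) = true), hfv]
      by_cases hp : (ps.any fun p => PySem.Str.startswith (PySem.Str.lower (PySem.Str.strip raw)) p) = true
      · rw [if_pos hp]
        by_cases hv : (extractColon (PySem.Str.strip raw) == "") = true
        · have hg : gStep ps "" raw = "" := by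
            unfold gStep
            rw [if_pos (by rw [hp]; rfl), if_pos hv]
          rw [hg, if_pos (by decide : ((("" : String) == "")) = true), if_pos hv]
        · have hg : gStep ps "" raw = extractColon (PySem.Str.strip raw) := by
            unfold gStep
            rw [if_pos (by rw [hp]; rfl), if_neg hv]
          rw [hg]
      · have hg : gStep ps "" raw = "" := by
          unfold gStep
          rw [if_neg (fun h => hp ((Bool.and_eq_true _ _ ▸ h).1))]
        rw [hg, if_pos (by decide : ((("" : String) == "")) = true), if_neg hp]
    · have hu' : (u == "") = false := by simp [hu]
      have hg : gStep ps u raw = u := by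
        unfold gStep
        rw [hu']
        simp only [Bool.and_false, Bool.false_eq_true, if_false]
      rw [hg, if_neg (by rw [hu']; exact Bool.false_ne_true), if_neg (by rw [hu']; exact Bool.false_ne_true)]

-- ===== VERDICT (by name: the statement is the Claim_ definition above) =====
theorem parse_optional_headers_spec : Claim_equal_parse_optional_headers := by
  intro text _
  unfold Spec_parse_optional_headers parse_optional_headers parse_optional_headers_alt
  rw [factor, g_first, g_first, g_first]
  rfl
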